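-- pv_equiv track=rewrite | github.com/saurav935/DSA-Java-Bootcamp | Leetcode assignments/Recursion/Easy/1. Sum triangle from array.py | traingle
-- ===== SOURCE A (Python) =====
-- def traingle(nums,index,arr,temp):
--     if len(nums) == 1:
--         return arr
--     elif index == len(nums)-1:
--         temp.append(nums[index]+nums[index-1])
--         arr.append(temp)
--         return traingle(temp,1,arr,[])
--     elif index != len(nums)-1:
--         temp.append(nums[index]+nums[index-1])
--         return traingle(nums,index+1,arr,temp)
-- ===== SOURCE B (Python) =====
-- def traingle(nums, index, arr, temp):
--     while len(nums) > 1: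
--         for i in range(index, len(nums)):
--             temp.append(nums[i] + nums[i - 1])
--         arr.append(temp)
--         nums = temp
--         temp = []
--         index = 1
--     return arr
-- ===== Notes on version B (the rewrite author's own statement) =====
-- stated objective: simpler
-- what changed: Replaces A's tail recursion (one call frame per element appended, plus one per level) by an explicit iterative while-loop over triangle levels with an inner for over indices.
import Mathlib
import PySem

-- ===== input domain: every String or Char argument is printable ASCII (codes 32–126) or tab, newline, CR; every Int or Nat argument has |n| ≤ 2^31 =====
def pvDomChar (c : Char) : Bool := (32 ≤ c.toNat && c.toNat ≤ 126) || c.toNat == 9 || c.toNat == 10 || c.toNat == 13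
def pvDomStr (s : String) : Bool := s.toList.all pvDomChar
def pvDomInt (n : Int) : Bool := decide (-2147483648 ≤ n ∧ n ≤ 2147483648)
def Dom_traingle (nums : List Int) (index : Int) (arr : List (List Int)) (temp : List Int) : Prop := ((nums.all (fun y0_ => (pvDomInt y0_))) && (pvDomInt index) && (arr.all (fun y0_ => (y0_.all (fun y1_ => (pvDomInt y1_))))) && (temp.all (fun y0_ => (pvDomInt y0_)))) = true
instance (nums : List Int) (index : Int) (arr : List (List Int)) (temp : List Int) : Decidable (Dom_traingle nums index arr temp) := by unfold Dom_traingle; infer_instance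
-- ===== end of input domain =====

-- B replaces A's tail recursion by an explicit while-loop over triangle levels (objective: simpler); equivalence is about return values (A and B mutate arr/temp alike).

-- helper cited by the ports' termination proofs
theorem inRange_of_pyGet?_some {α : Type} (xs : List α) (i : Int) (v : α)
    (h : PySem.List.pyGet? xs i = some v) : PySem.Raise.InRange xs.length i := by
  by_contra hc
  rw [← PySem.List.pyGet?_eq_none_iff] at hc
  rw [h] at hc; simp at hc

-- ===== PORT A =====
-- Literal port of A's recursion; the `| _, _ => arr` arm is reached exactly where Python raises IndexError (excluded by Pre_).
def traingle (nums : List Int) (index : Int) (arr : List (List Int)) (temp : List Int) : List (List Int) :=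
  if nums.length = 1 then arr
  else
    match h1 : PySem.List.pyGet? nums index, h2 : PySem.List.pyGet? nums (index - 1) with
    | some a, some b =>
      if index = (nums.length : Int) - 1 then
        traingle (temp ++ [a + b]) 1 (arr ++ [temp ++ [a + b]]) []
      else
        traingle nums (index + 1) arr (temp ++ [a + b])
    | _, _ => arr
termination_by (((temp.length : Int) - index + 1).toNat, nums.length, (((nums.length : Int)) - index).toNat)
decreasing_by
  · have hr := inRange_of_pyGet?_some _ _ _ h1
    unfold PySem.Raise.InRange at hr
    simp_wf
    by_cases hE : ((temp.length : Int) - index + 1).toNat = 0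
    · rw [hE]
      exact Prod.Lex.right _ (Prod.Lex.left _ _ (by omega))
    · exact Prod.Lex.left _ _ (by omega)
  · have hr := inRange_of_pyGet?_some _ _ _ h1
    unfold PySem.Raise.InRange at hr
    simp_wf
    exact Prod.Lex.right _ (Prod.Lex.right _ (by omega))

-- ===== PORT B =====
-- Literal port of Source B's while-loop; nums[i] is `pyGetD … 0`, whose default is reached only where Python raises (excluded by Pre_).
def traingle_alt (nums : List Int) (index : Int) (arr : List (List Int)) (temp : List Int) : List (List Int) :=
  if 1 < nums.length then
    let row := temp ++ (PySem.List.pyRange index (nums.length : Int) 1).map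
        (fun i => PySem.List.pyGetD nums i 0 + PySem.List.pyGetD nums (i - 1) 0)
    traingle_alt row 1 (arr ++ [row]) []
  else arr
termination_by (temp.length + (((nums.length : Int)) - index).toNat, nums.length)
decreasing_by
  · simp_wf
    by_cases hm : temp.length + (((nums.length : Int)) - index).toNat = 0
    · have h0 : (((temp.length : Int)) + max (((nums.length : Int)) - index) 0).toNat - 1 = 0 := by omega
      rw [h0, hm]
      exact Prod.Lex.right _ (by omega)
    · exact Prod.Lex.left _ _ (by omega)

-- ===== PRECONDITION & SPEC =====
-- Pre_ excludes exactly the inputs where A raises IndexError: empty nums, or (len ≥ 2 and) a start index outside [-(len-1), len-1].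
def Pre_traingle (nums : List Int) (index : Int) (arr : List (List Int)) (temp : List Int) : Prop :=
  nums.length = 1 ∨ (2 ≤ nums.length ∧ -((nums.length : Int) - 1) ≤ index ∧ index ≤ (nums.length : Int) - 1)
instance (nums : List Int) (index : Int) (arr : List (List Int)) (temp : List Int) : Decidable (Pre_traingle nums index arr temp) := by unfold Pre_traingle; infer_instance
def pvWitness_traingle : List Int × Int × List (List Int) × List Int := ([1, 2, 3], 1, [], [])

def Spec_traingle (nums : List Int) (index : Int) (arr : List (List Int)) (temp : List Int) (out : List (List Int)) : Prop := out = traingle_alt nums index arr temp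
instance (nums : List Int) (index : Int) (arr : List (List Int)) (temp : List Int) (out : List (List Int)) : Decidable (Spec_traingle nums index arr temp out) := by unfold Spec_traingle; infer_instance

-- ===== CLAIM (what is proved, stated in full; the proofs are below) =====
def Claim_equal_traingle : Prop := ∀ (nums : List Int) (index : Int) (arr : List (List Int)) (temp : List Int), Dom_traingle nums index arr temp → Pre_traingle nums index arr temp → Spec_traingle nums index arr temp (traingle nums index arr temp)

-- ===== LEMMAS AND PROOFS =====

theorem pyGet?_some_of_inRange {α : Type} (xs : List α) (i : Int) (d : α)
    (h : PySem.Raise.InRange xs.length i) :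
    PySem.List.pyGet? xs i = some (PySem.List.pyGetD xs i d) := by
  cases hx : PySem.List.pyGet? xs i with
  | none => exact absurd ((PySem.List.pyGet?_eq_none_iff xs i).mp hx) (not_not_intro h)
  | some v => simp [PySem.List.pyGetD, hx]

-- the row B builds from `nums` starting at `index` (the map over range(index, len(nums)))
def rowFrom (nums : List Int) (index : Int) : List Int :=
  (PySem.List.pyRange index (nums.length : Int) 1).map
    (fun i => PySem.List.pyGetD nums i 0 + PySem.List.pyGetD nums (i - 1) 0)

-- A's inner recursion collapses one triangle level into B's row
theorem traingle_level (k : Nat) : ∀ (nums : List Int) (index : Int) (arr : List (List Int)) (temp : List Int),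
    2 ≤ nums.length → index = (nums.length : Int) - 1 - k → -((nums.length : Int) - 1) ≤ index →
    traingle nums index arr temp
      = traingle (temp ++ rowFrom nums index) 1 (arr ++ [temp ++ rowFrom nums index]) [] := by
  induction k with
  | zero =>
    intro nums index arr temp hlen hk hlo
    rw [traingle, if_neg (by omega)]
    split
    next a b heq1 heq2 =>
      have ha := pyGet?_some_of_inRange nums index 0 ⟨by omega, by omega⟩
      have hb := pyGet?_some_of_inRange nums (index - 1) 0 ⟨by omega, by omega⟩
      rw [heq1] at ha; rw [heq2] at hb
      replace ha := Option.some.inj ha; replace hb := Option.some.inj hb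
      have hrow : rowFrom nums index = [PySem.List.pyGetD nums index 0 + PySem.List.pyGetD nums (index - 1) 0] := by
        unfold rowFrom
        rw [show ((nums.length : Int)) = index + 1 by omega, PySem.List.pyRange_one_singleton]
        simp
      rw [if_pos (by omega), hrow, ha, hb]
    next hno =>
      exact (hno _ _ (pyGet?_some_of_inRange nums index 0 ⟨by omega, by omega⟩)
        (pyGet?_some_of_inRange nums (index - 1) 0 ⟨by omega, by omega⟩)).elim
  | succ k ih =>
    intro nums index arr temp hlen hk hlo
    rw [traingle, if_neg (by omega)]
    split
    next a b heq1 heq2 =>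
      have ha := pyGet?_some_of_inRange nums index 0 ⟨by omega, by omega⟩
      have hb := pyGet?_some_of_inRange nums (index - 1) 0 ⟨by omega, by omega⟩
      rw [heq1] at ha; rw [heq2] at hb
      replace ha := Option.some.inj ha; replace hb := Option.some.inj hb
      have hrow : rowFrom nums index
          = (PySem.List.pyGetD nums index 0 + PySem.List.pyGetD nums (index - 1) 0) :: rowFrom nums (index + 1) := by
        unfold rowFrom
        rw [PySem.List.pyRange_one_cons (by omega : index < (nums.length : Int))]
        simp
      rw [if_neg (by omega)]
      rw [ih nums (index + 1) arr (temp ++ [a + b]) hlen (by omega) (by omega)]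
      rw [hrow, ha, hb]
      simp
    next hno =>
      exact (hno _ _ (pyGet?_some_of_inRange nums index 0 ⟨by omega, by omega⟩)
        (pyGet?_some_of_inRange nums (index - 1) 0 ⟨by omega, by omega⟩)).elim

theorem length_rowFrom (nums : List Int) (index : Int) :
    (rowFrom nums index).length = (((nums.length : Int)) - index).toNat := by
  unfold rowFrom
  simp [PySem.List.length_pyRange_one]

-- the equivalence, by induction on B's loop measure
theorem traingle_key (mu : Nat) : ∀ (nums : List Int) (index : Int) (arr : List (List Int)) (temp : List Int),
    temp.length + (((nums.length : Int)) - index).toNat ≤ mu →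
    Pre_traingle nums index arr temp →
    traingle nums index arr temp = traingle_alt nums index arr temp := by
  induction mu with
  | zero =>
    intro nums index arr temp hb hpre
    rcases hpre with h1 | ⟨h2, hlo, hhi⟩
    · rw [traingle, if_pos h1, traingle_alt, if_neg (by omega)]
    · omega
  | succ m ih =>
    intro nums index arr temp hb hpre
    rcases hpre with h1 | ⟨h2, hlo, hhi⟩
    · rw [traingle, if_pos h1, traingle_alt, if_neg (by omega)]
    · rw [traingle_alt, if_pos (by omega)]
      show _ = traingle_alt (temp ++ rowFrom nums index) 1 (arr ++ [temp ++ rowFrom nums index]) []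
      rw [traingle_level (((nums.length : Int)) - 1 - index).toNat nums index arr temp h2 (by omega) hlo]
      have hrl : (temp ++ rowFrom nums index).length = temp.length + (((nums.length : Int)) - index).toNat := by
        simp [length_rowFrom]
      exact ih (temp ++ rowFrom nums index) 1 (arr ++ [temp ++ rowFrom nums index]) []
        (by rw [List.length_nil, hrl]; omega)
        (by unfold Pre_traingle; rw [hrl]; omega)

-- ===== VERDICT (by name: the statement is the Claim_ definition above) =====
theorem traingle_spec : Claim_equal_traingle := by
  intro nums index arr temp _ hpre
  unfold Spec_traingle
  exact traingle_key (temp.length + (((nums.length : Int)) - index).toNat) nums index arr temp le_rfl hpre
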